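-- pv_equiv track=rewrite | github.com/iansedano/aoc | python/2022/day_15.py | part1
-- ===== SOURCE A (Python) =====
-- def manhattan(p1, p2):
--     x = abs(p2[0] - p1[0])
--     y = abs(p2[1] - p1[1])
--
--     return x + y
--
-- def part1(data):
--     """Solve part 1."""
--     sensors = [sensor for sensor, _ in data]
--     beacons = {beacon for _, beacon in data}
--     distances = [manhattan(sensor, beacon) for sensor, beacon in data]
--     max_distance = max(distances)
--
--     min_x = min(sensor[0] - max_distance for sensor in sensors)
--     max_x = max(sensor[0] + max_distance for sensor in sensors)
--
--     Y_ROW = 2_000_000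
--     # Y_ROW = 10
--
--     squares_where_beacon_cant_be = 0
--     for x in range(min_x, max_x):
--
--         if any(
--             manhattan((x, Y_ROW), sensor) <= distance
--             and (x, Y_ROW) not in beacons
--             for sensor, distance in zip(sensors, distances)
--         ):
--             squares_where_beacon_cant_be += 1
--
--     return squares_where_beacon_cant_be
-- ===== SOURCE B (Python) =====
-- def part1(data):
--     """Solve part 1."""
--     Y_ROW = 2_000_000
--     intervals = []
--     beacon_xs = set()
--     for (sx, sy), (bx, by) in data:
--         d = abs(bx - sx) + abs(by - sy)
--         dy = abs(Y_ROW - sy)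
--         if dy <= d:
--             intervals.append((sx - (d - dy), sx + (d - dy)))
--         if by == Y_ROW:
--             beacon_xs.add(bx)
--     intervals.sort(key=lambda iv: iv[0])
--     merged = []
--     cur = None
--     for lo, hi in intervals:
--         if cur is None:
--             cur = (lo, hi)
--         elif lo <= cur[1] + 1:
--             if hi > cur[1]:
--                 cur = (cur[0], hi)
--         else:
--             merged.append(cur)
--             cur = (lo, hi)
--     if cur is not None:
--         merged.append(cur)
--     count = 0
--     for lo, hi in merged:
--         count += hi - lo + 1
--     for bx in beacon_xs:
--         if any(lo <= bx <= hi for lo, hi in merged):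
--             count -= 1
--     return count
-- ===== Notes on version B (the rewrite author's own statement) =====
-- stated objective: faster
-- what changed: B replaces A's cell-by-cell scan of the whole x-range (testing every sensor for every x) with per-sensor coverage intervals on the row, sorted and merged once, summing merged lengths and subtracting covered row beacons.
-- intended difference: On inputs where the rightmost scanned column max_x is itself covered by a sensor and holds no beacon, A's range(min_x, max_x) stops one cell short and returns a count one less than the number of row cells that cannot hold a beacon; B counts that cell too, which is the intended answer. — e.g. on part1([((0, 2000000), (0, 2000002))]): A returns 4, B returns 5
import Mathlib
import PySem

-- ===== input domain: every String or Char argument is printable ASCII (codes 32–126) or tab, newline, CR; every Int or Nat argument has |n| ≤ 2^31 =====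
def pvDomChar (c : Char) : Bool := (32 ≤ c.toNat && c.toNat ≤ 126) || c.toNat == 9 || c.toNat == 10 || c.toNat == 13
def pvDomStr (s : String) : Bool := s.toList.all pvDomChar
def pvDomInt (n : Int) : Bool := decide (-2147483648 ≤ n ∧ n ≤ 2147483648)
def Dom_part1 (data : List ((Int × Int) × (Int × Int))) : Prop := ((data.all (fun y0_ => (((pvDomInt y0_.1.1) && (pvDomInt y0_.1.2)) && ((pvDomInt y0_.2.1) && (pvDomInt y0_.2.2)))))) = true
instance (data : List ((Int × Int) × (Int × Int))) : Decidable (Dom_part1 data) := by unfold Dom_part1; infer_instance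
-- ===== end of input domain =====

-- B replaces A's cell-by-cell scan of the whole x-range with merged per-sensor
-- coverage intervals on the row; on the exceptional inputs described at D_part1
-- below B also counts the rightmost covered cell, which A's range() scan misses.

-- ===== PORT A =====
def manhattan (p1 p2 : Int × Int) : Int :=
  ((p2.1 - p1.1).natAbs : Int) + ((p2.2 - p1.2).natAbs : Int)

def part1 (data : List ((Int × Int) × (Int × Int))) : Int :=
  let sensors := data.map (fun p => p.1)
  let beacons := PySem.Set.ofList (data.map (fun p => p.2))
  let distances := data.map (fun p => manhattan p.1 p.2)
  -- max(distances) / min(...) / max(...) raise ValueError on empty data: outside Pre_, .getD 0 is never seen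
  let max_distance := (PySem.List.max? distances (fun d => d)).getD 0
  let min_x := (PySem.List.min? (sensors.map (fun s => s.1 - max_distance)) (fun v => v)).getD 0
  let max_x := (PySem.List.max? (sensors.map (fun s => s.1 + max_distance)) (fun v => v)).getD 0
  (PySem.List.pyRange min_x max_x).foldl
    (fun acc x =>
      if (sensors.zip distances).any (fun sd =>
            decide (manhattan (x, 2000000) sd.1 ≤ sd.2) &&
            !(PySem.Set.contains beacons (x, 2000000)))
      then acc + 1 else acc) 0

-- ===== PORT B =====
def part1_alt (data : List ((Int × Int) × (Int × Int))) : Int :=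
  let st := data.foldl
    (fun (st : List (Int × Int) × PySem.Set Int) p =>
      let d : Int := ((p.2.1 - p.1.1).natAbs : Int) + ((p.2.2 - p.1.2).natAbs : Int)
      let dy : Int := ((2000000 - p.1.2).natAbs : Int)
      (if dy ≤ d then st.1 ++ [(p.1.1 - (d - dy), p.1.1 + (d - dy))] else st.1,
       if p.2.2 == 2000000 then PySem.Set.add st.2 p.2.1 else st.2))
    ([], PySem.Set.empty)
  let sortedIvs := PySem.List.sorted st.1 (fun iv => iv.1)
  let mc := sortedIvs.foldl
    (fun (mc : List (Int × Int) × Option (Int × Int)) iv =>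
      match mc.2 with
      | none => (mc.1, some iv)
      | some c =>
        if iv.1 ≤ c.2 + 1 then
          (if c.2 < iv.2 then (mc.1, some (c.1, iv.2)) else (mc.1, some c))
        else (mc.1 ++ [c], some iv))
    ([], none)
  let merged := mc.1 ++ mc.2.toList
  let count := merged.foldl (fun acc iv => acc + (iv.2 - iv.1 + 1)) 0
  st.2.foldl
    (fun acc bx =>
      if merged.any (fun iv => decide (iv.1 ≤ bx) && decide (bx ≤ iv.2)) then acc - 1 else acc)
    count

-- ===== PRECONDITION & SPEC =====
def pvMaxD (data : List ((Int × Int) × (Int × Int))) : Int :=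
  (data.map (fun p => |p.2.1 - p.1.1| + |p.2.2 - p.1.2|)).foldl max 0

def pvMaxX (data : List ((Int × Int) × (Int × Int))) : Int :=
  match data with
  | [] => 0
  | p :: t => t.foldl (fun m q => max m q.1.1) p.1.1 + pvMaxD data

-- Pre_ excludes only the empty list, on which A raises ValueError (max() of an empty sequence).
def Pre_part1 (data : List ((Int × Int) × (Int × Int))) : Prop := data ≠ []

instance (data : List ((Int × Int) × (Int × Int))) : Decidable (Pre_part1 data) := by
  unfold Pre_part1; infer_instance

def pvWitness_part1 : (List ((Int × Int) × (Int × Int))) := [((0, 0), (1, 1))]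

-- D_: inputs where the rightmost scanned column max_x is itself covered by some sensor and holds
-- no beacon; there A's `range(min_x, max_x)` stops one cell short and A returns a count one below
-- the number of row cells that cannot hold a beacon, while B returns that full count, which is
-- the intended answer.
def D_part1 (data : List ((Int × Int) × (Int × Int))) : Prop :=
  data ≠ [] ∧
  (∃ p ∈ data, |p.1.1 - pvMaxX data| + |p.1.2 - 2000000| ≤ |p.2.1 - p.1.1| + |p.2.2 - p.1.2|) ∧
  (∀ p ∈ data, p.2 ≠ (pvMaxX data, 2000000))

instance (data : List ((Int × Int) × (Int × Int))) : Decidable (D_part1 data) := by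
  unfold D_part1; infer_instance

def Spec_part1 (data : List ((Int × Int) × (Int × Int))) (out : Int) : Prop :=
  ¬ D_part1 data → out = part1_alt data

instance (data : List ((Int × Int) × (Int × Int))) (out : Int) : Decidable (Spec_part1 data out) := by
  unfold Spec_part1; infer_instance

def pvDiffWitness_part1 : (List ((Int × Int) × (Int × Int))) := [((0, 2000000), (0, 2000002))]

def pvDiffWitnessOut_part1 : Int × Int := (4, 5)

-- ===== CLAIM (what is proved, stated in full; the proofs are below) =====
def Claim_unchanged_part1 : Prop := ∀ (data : List ((Int × Int) × (Int × Int))), Dom_part1 data → Pre_part1 data → Spec_part1 data (part1 data)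

def Claim_changed_part1 : Prop := Dom_part1 (pvDiffWitness_part1) ∧ Pre_part1 (pvDiffWitness_part1) ∧ D_part1 (pvDiffWitness_part1) ∧ part1 (pvDiffWitness_part1) = pvDiffWitnessOut_part1.1 ∧ part1_alt (pvDiffWitness_part1) = pvDiffWitnessOut_part1.2 ∧ pvDiffWitnessOut_part1.1 ≠ pvDiffWitnessOut_part1.2

def Claim_exact_part1 : Prop := ∀ (data : List ((Int × Int) × (Int × Int))), Dom_part1 data → Pre_part1 data → D_part1 data → part1 data ≠ part1_alt data

-- ===== LEMMAS AND PROOFS =====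

def pvDist (p : (Int × Int) × (Int × Int)) : Int :=
  ((p.2.1 - p.1.1).natAbs : Int) + ((p.2.2 - p.1.2).natAbs : Int)

theorem absDist_eq :
    (fun p : (Int × Int) × (Int × Int) => |p.2.1 - p.1.1| + |p.2.2 - p.1.2|) = pvDist := by
  funext p
  unfold pvDist
  rw [Int.abs_eq_natAbs, Int.abs_eq_natAbs]

def pvMaxDP (data : List ((Int × Int) × (Int × Int))) : Int :=
  (PySem.List.max? (data.map pvDist) (fun d => d)).getD 0

def pvMaxXP (data : List ((Int × Int) × (Int × Int))) : Int :=
  (PySem.List.max? (data.map (fun p => p.1.1 + pvMaxDP data)) (fun v => v)).getD 0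

theorem maxD_bridge (data : List ((Int × Int) × (Int × Int))) (h : data ≠ []) :
    pvMaxD data = pvMaxDP data := by
  cases data with
  | nil => exact absurd rfl h
  | cons p t =>
    unfold pvMaxD pvMaxDP
    rw [absDist_eq, List.map_cons, PySem.List.max?_id_cons]
    simp only [Option.getD_some]
    rw [List.foldl_cons]
    have h0 : (0 : Int) ≤ pvDist p := by unfold pvDist; positivity
    rw [max_eq_right h0]

theorem foldl_max_add (t : List ((Int × Int) × (Int × Int))) (D : Int) :
    ∀ c : Int, t.foldl (fun m q => max m (q.1.1 + D)) (c + D) =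
      t.foldl (fun m q => max m q.1.1) c + D := by
  induction t with
  | nil => intro c; simp
  | cons q t ih =>
    intro c
    rw [List.foldl_cons, List.foldl_cons,
      show max (c + D) (q.1.1 + D) = max c q.1.1 + D from max_add_add_right c q.1.1 D]
    exact ih (max c q.1.1)

theorem maxX_bridge (data : List ((Int × Int) × (Int × Int))) (h : data ≠ []) :
    pvMaxX data = pvMaxXP data := by
  cases data with
  | nil => exact absurd rfl h
  | cons p t =>
    unfold pvMaxX pvMaxXP
    rw [List.map_cons, PySem.List.max?_id_cons]
    simp only [Option.getD_some]
    rw [List.foldl_map, maxD_bridge _ h]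
    exact (foldl_max_add t (pvMaxDP (p :: t)) p.1.1).symm

def pvMinX (data : List ((Int × Int) × (Int × Int))) : Int :=
  (PySem.List.min? (data.map (fun p => p.1.1 - pvMaxDP data)) (fun v => v)).getD 0

def pvCov (data : List ((Int × Int) × (Int × Int))) (x : Int) : Bool :=
  data.any (fun p => decide (((p.1.1 - x).natAbs : Int) + ((p.1.2 - 2000000).natAbs : Int) ≤ pvDist p))

def pvBeac (data : List ((Int × Int) × (Int × Int))) (x : Int) : Bool :=
  decide ((x, 2000000) ∈ data.map (fun p => p.2))

def pvRad (p : (Int × Int) × (Int × Int)) : Int := pvDist p - ((2000000 - p.1.2).natAbs : Int)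

def pvIvs (data : List ((Int × Int) × (Int × Int))) : List (Int × Int) :=
  (data.filter (fun p => decide (((2000000 - p.1.2).natAbs : Int) ≤ pvDist p))).map
    (fun p => (p.1.1 - pvRad p, p.1.1 + pvRad p))

def pvBxs (data : List ((Int × Int) × (Int × Int))) : PySem.Set Int :=
  PySem.Set.ofList ((data.filter (fun p => p.2.2 == 2000000)).map (fun p => p.2.1))

def mergeStep (mc : List (Int × Int) × Option (Int × Int)) (iv : Int × Int) :
    List (Int × Int) × Option (Int × Int) :=
  match mc.2 with
  | none => (mc.1, some iv)
  | some c =>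
    if iv.1 ≤ c.2 + 1 then
      (if c.2 < iv.2 then (mc.1, some (c.1, iv.2)) else (mc.1, some c))
    else (mc.1 ++ [c], some iv)

def pvMerged (data : List ((Int × Int) × (Int × Int))) : List (Int × Int) :=
  let mc := (PySem.List.sorted (pvIvs data) (fun iv => iv.1)).foldl mergeStep ([], none)
  mc.1 ++ mc.2.toList

def inU (ms : List (Int × Int)) (x : Int) : Prop := ∃ q ∈ ms, q.1 ≤ x ∧ x ≤ q.2

def gapped (ms : List (Int × Int)) : Prop :=
  List.Pairwise (fun q r : Int × Int => q.2 + 1 < r.1) ms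

theorem inU_nil (x : Int) : inU [] x ↔ False := by simp [inU]

theorem inU_cons (q : Int × Int) (ms : List (Int × Int)) (x : Int) :
    inU (q :: ms) x ↔ (q.1 ≤ x ∧ x ≤ q.2) ∨ inU ms x := by
  simp [inU]

theorem inU_append (ms ns : List (Int × Int)) (x : Int) :
    inU (ms ++ ns) x ↔ inU ms x ∨ inU ns x := by
  simp [inU, or_and_right, exists_or]

set_option maxHeartbeats 1000000 in
theorem merge_fold (l : List (Int × Int)) :
    ∀ (fin : List (Int × Int)) (cur : Option (Int × Int)),
    l.Pairwise (fun u v => u.1 ≤ v.1) →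
    (∀ q ∈ l, q.1 ≤ q.2) →
    (∀ c, cur = some c → c.1 ≤ c.2 ∧ ∀ q ∈ l, c.1 ≤ q.1) →
    (cur = none → fin = []) →
    (∀ q ∈ fin, q.1 ≤ q.2) →
    gapped fin →
    (∀ c, cur = some c → ∀ f ∈ fin, f.2 + 1 < c.1) →
    (∀ q ∈ (l.foldl mergeStep (fin, cur)).1 ++ (l.foldl mergeStep (fin, cur)).2.toList, q.1 ≤ q.2) ∧
    gapped ((l.foldl mergeStep (fin, cur)).1 ++ (l.foldl mergeStep (fin, cur)).2.toList) ∧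
    (∀ x, inU ((l.foldl mergeStep (fin, cur)).1 ++ (l.foldl mergeStep (fin, cur)).2.toList) x ↔
          (inU (fin ++ cur.toList) x ∨ inU l x)) := by
  induction l with
  | nil =>
    intro fin cur _ _ hcur _ hfinok hfing hcross
    refine ⟨?_, ?_, ?_⟩
    · intro q hq
      simp only [List.foldl_nil] at hq
      rcases List.mem_append.1 hq with h | h
      · exact hfinok q h
      · cases cur with
        | none => simp at h
        | some c => simp at h; subst h; exact (hcur q rfl).1
    · simp only [List.foldl_nil]
      cases cur with
      | none => simpa [gapped] using hfing
      | some c =>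
        unfold gapped
        rw [List.pairwise_append]
        refine ⟨hfing, by simp, ?_⟩
        intro a ha b hb
        simp at hb; subst hb
        exact hcross _ rfl a ha
    · intro x; simp only [List.foldl_nil, inU_nil, or_false]
  | cons iv l ih =>
    intro fin cur hpw hok hcur hnone hfinok hfing hcross
    have hpw' := (List.pairwise_cons.1 hpw).2
    have hivle := (List.pairwise_cons.1 hpw).1
    have hivok : iv.1 ≤ iv.2 := hok iv (by simp)
    have hok' : ∀ q ∈ l, q.1 ≤ q.2 := fun q hq => hok q (by simp [hq])
    cases cur with
    | none =>
      have hfin0 : fin = [] := hnone rfl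
      subst hfin0
      simp only [List.foldl_cons]
      have step : mergeStep ([], none) iv = ([], some iv) := rfl
      rw [step]
      have := ih [] (some iv) hpw' hok'
        (by intro c' hc'; injection hc' with h; subst h; exact ⟨hivok, hivle⟩)
        (by simp) (by simp) (by simp [gapped]) (by simp)
      refine ⟨this.1, this.2.1, ?_⟩
      intro x
      rw [this.2.2 x]
      simp only [List.nil_append, Option.toList_some, Option.toList_none, inU_cons, inU_nil,
        or_false, false_or]
    | some c =>
      obtain ⟨hcok, hcle⟩ := hcur c rfl
      have hcle_iv : c.1 ≤ iv.1 := hcle iv (by simp)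
      simp only [List.foldl_cons]
      by_cases h1 : iv.1 ≤ c.2 + 1
      · by_cases h2 : c.2 < iv.2
        · have hstep : mergeStep (fin, some c) iv = (fin, some (c.1, iv.2)) := by
            simp [mergeStep, h1, h2]
          rw [hstep]
          have := ih fin (some (c.1, iv.2)) hpw' hok'
            (by intro c' hc'; injection hc' with h; subst h
                exact ⟨by omega, fun q hq => hcle q (by simp [hq])⟩)
            (by simp) hfinok hfing
            (by intro c' hc'; injection hc' with h; subst h; intro f hf; have := hcross c rfl f hf; omega)
          refine ⟨this.1, this.2.1, ?_⟩
          intro x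
          rw [this.2.2 x]
          simp only [inU_append, inU_cons, Option.toList_some, inU_nil, or_false]
          have key : (c.1 ≤ x ∧ x ≤ iv.2) ↔ ((c.1 ≤ x ∧ x ≤ c.2) ∨ (iv.1 ≤ x ∧ x ≤ iv.2)) := by
            omega
          rw [key]; tauto
        · have hstep : mergeStep (fin, some c) iv = (fin, some c) := by
            simp [mergeStep, h1, h2]
          rw [hstep]
          have := ih fin (some c) hpw' hok'
            (by intro c' hc'; injection hc' with h; subst h; exact ⟨hcok, fun q hq => hcle q (by simp [hq])⟩)
            (by simp) hfinok hfing
            (by intro c' hc'; injection hc' with h; subst h; intro f hf; have := hcross c rfl f hf; omega)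
          refine ⟨this.1, this.2.1, ?_⟩
          intro x
          rw [this.2.2 x]
          simp only [inU_append, inU_cons, Option.toList_some, inU_nil, or_false]
          have key : (iv.1 ≤ x ∧ x ≤ iv.2) → (c.1 ≤ x ∧ x ≤ c.2) := by omega
          tauto
      · have hstep : mergeStep (fin, some c) iv = (fin ++ [c], some iv) := by
          simp [mergeStep, h1]
        rw [hstep]
        have hfing' : gapped (fin ++ [c]) := by
          unfold gapped
          rw [List.pairwise_append]
          exact ⟨hfing, by simp, fun a ha b hb => by simp at hb; subst hb; exact hcross _ rfl a ha⟩
        have := ih (fin ++ [c]) (some iv) hpw' hok'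
          (by intro c' hc'; injection hc' with h; subst h; exact ⟨hivok, hivle⟩)
          (by simp)
          (by intro q hq
              rcases List.mem_append.1 hq with h | h
              · exact hfinok q h
              · simp at h; subst h; exact hcok)
          hfing'
          (by intro c' hc'; injection hc' with h'; subst h'
              intro f hf
              rcases List.mem_append.1 hf with h | h
              · have := hcross c rfl f h; omega
              · simp at h; subst h; omega)
        refine ⟨this.1, this.2.1, ?_⟩
        intro x
        rw [this.2.2 x]
        simp only [inU_append, inU_cons, Option.toList_some, inU_nil, or_false]
        tauto

theorem count_gapped : ∀ (ms : List (Int × Int)) (a c : Int), gapped ms →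
    (∀ q ∈ ms, q.1 ≤ q.2) → (∀ q ∈ ms, a ≤ q.1 ∧ q.2 < c) → a ≤ c →
    (((PySem.List.pyRange a c).countP
        (fun x => ms.any (fun q => decide (q.1 ≤ x) && decide (x ≤ q.2)))) : Int) =
      (ms.map (fun q => q.2 - q.1 + 1)).sum := by
  intro ms
  induction ms with
  | nil => intro a c _ _ _ _; simp
  | cons q rest ih =>
    intro a c hg hok hbd hac
    have hq : q.1 ≤ q.2 := hok q (by simp)
    have hqb := hbd q (by simp)
    have hrest : ∀ r ∈ rest, q.2 + 1 < r.1 := (List.pairwise_cons.1 hg).1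
    rw [PySem.List.pyRange_one_append a q.1 c hqb.1 (by omega),
        PySem.List.pyRange_one_append q.1 (q.2 + 1) c (by omega) (by omega),
        List.countP_append, List.countP_append]
    have e1 : (PySem.List.pyRange a q.1).countP
        (fun x => (q :: rest).any (fun r => decide (r.1 ≤ x) && decide (x ≤ r.2))) = 0 := by
      rw [List.countP_eq_zero]
      intro x hx
      rw [PySem.List.mem_pyRange_one] at hx
      simp only [List.any_cons, Bool.or_eq_true, List.any_eq_true, Bool.and_eq_true,
        decide_eq_true_eq, not_or]
      constructor
      · rintro ⟨h1, h2⟩; omega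
      · rintro ⟨r, hr, h1, h2⟩
        have := hrest r hr; have := hok r (by simp [hr]); omega
    have e2 : (PySem.List.pyRange q.1 (q.2 + 1)).countP
        (fun x => (q :: rest).any (fun r => decide (r.1 ≤ x) && decide (x ≤ r.2))) =
        (PySem.List.pyRange q.1 (q.2 + 1)).length := by
      rw [List.countP_eq_length]
      intro x hx
      rw [PySem.List.mem_pyRange_one] at hx
      simp only [List.any_cons, Bool.or_eq_true, Bool.and_eq_true, decide_eq_true_eq]
      exact Or.inl ⟨by omega, by omega⟩
    have e3 : (PySem.List.pyRange (q.2 + 1) c).countP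
        (fun x => (q :: rest).any (fun r => decide (r.1 ≤ x) && decide (x ≤ r.2))) =
        (PySem.List.pyRange (q.2 + 1) c).countP
        (fun x => rest.any (fun r => decide (r.1 ≤ x) && decide (x ≤ r.2))) := by
      apply List.countP_congr
      intro x hx
      rw [PySem.List.mem_pyRange_one] at hx
      simp only [List.any_cons, Bool.or_eq_true, Bool.and_eq_true, decide_eq_true_eq]
      constructor
      · rintro (⟨h1, h2⟩ | h); · omega
        · exact h
      · exact fun h => Or.inr h
    have e4 := ih (q.2 + 1) c (List.pairwise_cons.1 hg).2
      (fun r hr => hok r (by simp [hr]))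
      (fun r hr => ⟨by have := hrest r hr; omega, (hbd r (by simp [hr])).2⟩)
      (by omega)
    rw [e1, e2, e3, PySem.List.length_pyRange_one]
    simp only [List.map_cons, List.sum_cons]
    have : ((q.2 + 1 - q.1).toNat : Int) = q.2 + 1 - q.1 := Int.toNat_of_nonneg (by omega)
    push_cast
    omega

theorem countP_and_split {α : Type} (l : List α) (p r : α → Bool) :
    l.countP p = l.countP (fun x => p x && r x) + l.countP (fun x => p x && !r x) := by
  induction l with
  | nil => simp
  | cons x t ih =>
    simp only [List.countP_cons]
    cases hp : p x <;> cases hr : r x <;> simp <;> omega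

theorem countP_or_disjoint {α : Type} (l : List α) (p q : α → Bool)
    (h : ∀ x ∈ l, ¬(p x = true ∧ q x = true)) :
    l.countP (fun x => p x || q x) = l.countP p + l.countP q := by
  induction l with
  | nil => simp
  | cons x t ih =>
    have ht := ih (fun y hy => h y (by simp [hy]))
    simp only [List.countP_cons, ht]
    cases hp : p x <;> cases hq : q x <;> simp <;> first | omega | exact absurd ⟨hp, hq⟩ (h x (by simp))

theorem countP_mem (a c : Int) : ∀ (S : List Int), S.Nodup → ∀ (f : Int → Bool),
    (∀ s ∈ S, f s = true → a ≤ s ∧ s < c) →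
    (PySem.List.pyRange a c).countP (fun x => f x && decide (x ∈ S)) = S.countP f := by
  intro S
  induction S with
  | nil => intro _ f _; simp
  | cons s T ih =>
    intro hnd f hbd
    have hsT : s ∉ T := (List.nodup_cons.1 hnd).1
    have congr1 : (PySem.List.pyRange a c).countP (fun x => f x && decide (x ∈ s :: T)) =
        (PySem.List.pyRange a c).countP
          (fun x => (f x && (x == s)) || (f x && decide (x ∈ T))) := by
      apply List.countP_congr
      intro x _
      by_cases hx : x = s <;> by_cases hxT : x ∈ T <;> simp [hx, hxT] <;> tauto
    rw [congr1, countP_or_disjoint _ _ _ ?dis]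
    case dis =>
      rintro x _ ⟨h1, h2⟩
      simp only [Bool.and_eq_true, beq_iff_eq, decide_eq_true_eq] at h1 h2
      exact hsT (h1.2 ▸ h2.2)
    have hfirst : (PySem.List.pyRange a c).countP (fun x => f x && (x == s)) =
        if f s then 1 else 0 := by
      cases hf : f s with
      | false =>
        rw [if_neg (by simp)]
        rw [List.countP_eq_zero]
        intro x _ hx
        simp only [Bool.and_eq_true, beq_iff_eq] at hx
        rw [hx.2] at hx
        rw [hf] at hx
        exact absurd hx.1 (by simp)
      | true =>
        rw [if_pos rfl]
        have c1 : (PySem.List.pyRange a c).countP (fun x => f x && (x == s)) =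
            (PySem.List.pyRange a c).countP (fun x => x == s) := by
          apply List.countP_congr
          intro x _
          by_cases hx : x = s
          · subst hx; simp [hf]
          · simp [hx]
        rw [c1, ← List.count_eq_countP]
        exact List.count_eq_one_of_mem (PySem.List.nodup_pyRange_one a c)
          (PySem.List.mem_pyRange_one.2 (hbd s (by simp) hf))
    rw [hfirst, ih (List.nodup_cons.1 hnd).2 f (fun t ht hf => hbd t (by simp [ht]) hf)]
    simp only [List.countP_cons]
    cases hf : f s <;> simp <;> omega

theorem any_and_const {α : Type} (l : List α) (f : α → Bool) (c : Bool) :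
    l.any (fun e => f e && c) = (l.any f && c) := by
  cases c <;> simp

theorem foldl_if_sub_one {α : Type} (p : α → Bool) (l : List α) :
    ∀ a : Int, l.foldl (fun acc x => if p x then acc - 1 else acc) a = a - l.countP p := by
  induction l with
  | nil => intro a; simp
  | cons x t ih =>
    intro a
    simp only [List.foldl_cons, List.countP_cons]
    cases hp : p x <;> simp [ih] <;> omega

theorem maxD_spec (data : List ((Int × Int) × (Int × Int))) (h : data ≠ []) :
    (∀ p ∈ data, pvDist p ≤ pvMaxDP data) ∧ 0 ≤ pvMaxDP data := by
  cases hm : PySem.List.max? (data.map pvDist) (fun d => d) with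
  | none =>
    rw [PySem.List.max?_eq_none_iff] at hm
    simp only [List.map_eq_nil_iff] at hm
    exact absurd hm h
  | some m =>
    have hmax := PySem.List.max?_isMax hm
    have hp : ∀ p ∈ data, pvDist p ≤ m := fun p hp =>
      hmax _ (List.mem_map_of_mem hp)
    have h0 : 0 ≤ m := by
      cases data with
      | nil => exact absurd rfl h
      | cons p0 t =>
        have := hp p0 (by simp)
        have : (0 : Int) ≤ pvDist p0 := by unfold pvDist; positivity
        omega
    unfold pvMaxDP
    rw [hm]
    exact ⟨hp, h0⟩

theorem maxX_spec (data : List ((Int × Int) × (Int × Int))) (h : data ≠ []) :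
    ∀ p ∈ data, p.1.1 + pvMaxDP data ≤ pvMaxXP data := by
  cases hm : PySem.List.max? (data.map (fun p => p.1.1 + pvMaxDP data)) (fun v => v) with
  | none =>
    rw [PySem.List.max?_eq_none_iff] at hm
    simp only [List.map_eq_nil_iff] at hm
    exact absurd hm h
  | some m =>
    have hmax := PySem.List.max?_isMax hm
    intro p hp
    have := hmax _ (List.mem_map_of_mem hp)
    unfold pvMaxXP
    rw [hm]
    exact this

theorem minX_spec (data : List ((Int × Int) × (Int × Int))) (h : data ≠ []) :
    ∀ p ∈ data, pvMinX data ≤ p.1.1 - pvMaxDP data := by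
  cases hm : PySem.List.min? (data.map (fun p => p.1.1 - pvMaxDP data)) (fun v => v) with
  | none =>
    rw [PySem.List.min?_eq_none_iff] at hm
    simp only [List.map_eq_nil_iff] at hm
    exact absurd hm h
  | some m =>
    have hmin := PySem.List.min?_isMin hm
    intro p hp
    have := hmin _ (List.mem_map_of_mem hp)
    unfold pvMinX
    rw [hm]
    exact this

theorem minx_le_maxx (data : List ((Int × Int) × (Int × Int))) (h : data ≠ []) :
    pvMinX data ≤ pvMaxXP data := by
  cases data with
  | nil => exact absurd rfl h
  | cons p0 t =>
    have h1 := minX_spec _ h p0 (by simp)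
    have h2 := maxX_spec _ h p0 (by simp)
    have h3 := (maxD_spec _ h).2
    omega

theorem cov_bounds (data : List ((Int × Int) × (Int × Int))) (h : data ≠ []) (x : Int)
    (hc : pvCov data x = true) : pvMinX data ≤ x ∧ x ≤ pvMaxXP data := by
  unfold pvCov at hc
  rw [List.any_eq_true] at hc
  obtain ⟨p, hp, hple⟩ := hc
  rw [decide_eq_true_eq] at hple
  have h1 := minX_spec _ h p hp
  have h2 := maxX_spec _ h p hp
  have h3 := (maxD_spec _ h).1 p hp
  simp only [pvDist] at hple h3
  omega

theorem cov_iff_inU (data : List ((Int × Int) × (Int × Int))) (x : Int) :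
    pvCov data x = true ↔ inU (pvIvs data) x := by
  unfold pvCov pvIvs inU
  rw [List.any_eq_true]
  constructor
  · rintro ⟨p, hp, hple⟩
    rw [decide_eq_true_eq] at hple
    refine ⟨(p.1.1 - pvRad p, p.1.1 + pvRad p), List.mem_map_of_mem ?_, ?_, ?_⟩
    · rw [List.mem_filter]
      refine ⟨hp, ?_⟩
      rw [decide_eq_true_eq]
      simp only [pvDist] at hple ⊢
      omega
    · simp only [pvDist, pvRad] at hple ⊢
      omega
    · simp only [pvDist, pvRad] at hple ⊢
      omega
  · rintro ⟨q, hq, hq1, hq2⟩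
    rw [List.mem_map] at hq
    obtain ⟨p, hpf, rfl⟩ := hq
    rw [List.mem_filter] at hpf
    obtain ⟨hp, hcond⟩ := hpf
    rw [decide_eq_true_eq] at hcond
    refine ⟨p, hp, ?_⟩
    rw [decide_eq_true_eq]
    simp only [pvDist, pvRad] at hcond hq1 hq2 ⊢
    omega

theorem ivs_ok (data : List ((Int × Int) × (Int × Int))) :
    ∀ q ∈ pvIvs data, q.1 ≤ q.2 := by
  intro q hq
  unfold pvIvs at hq
  rw [List.mem_map] at hq
  obtain ⟨p, hpf, rfl⟩ := hq
  rw [List.mem_filter] at hpf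
  have := hpf.2
  rw [decide_eq_true_eq] at this
  simp only [pvRad]
  omega

theorem bxs_iff (data : List ((Int × Int) × (Int × Int))) (x : Int) :
    x ∈ pvBxs data ↔ pvBeac data x = true := by
  unfold pvBxs pvBeac
  rw [PySem.Set.mem_ofList, decide_eq_true_eq, List.mem_map, List.mem_map]
  constructor
  · rintro ⟨p, hpf, rfl⟩
    rw [List.mem_filter] at hpf
    refine ⟨p, hpf.1, ?_⟩
    have := hpf.2
    rw [beq_iff_eq] at this
    exact Prod.ext rfl this
  · rintro ⟨p, hp, hpe⟩
    refine ⟨p, ?_, ?_⟩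
    · rw [List.mem_filter]
      exact ⟨hp, by rw [beq_iff_eq]; exact congrArg Prod.snd hpe⟩
    · exact congrArg Prod.fst hpe

theorem merged_spec (data : List ((Int × Int) × (Int × Int))) :
    (∀ q ∈ pvMerged data, q.1 ≤ q.2) ∧ gapped (pvMerged data) ∧
    (∀ x, inU (pvMerged data) x ↔ pvCov data x = true) := by
  have hs := PySem.List.sorted_pairwise (pvIvs data) (fun iv => iv.1)
  have hok : ∀ q ∈ PySem.List.sorted (pvIvs data) (fun iv => iv.1), q.1 ≤ q.2 := by
    intro q hq
    rw [PySem.List.mem_sorted] at hq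
    exact ivs_ok data q hq
  have hmf := merge_fold (PySem.List.sorted (pvIvs data) (fun iv => iv.1)) [] none
    hs hok (by simp) (fun _ => rfl) (by simp) (by simp [gapped]) (by simp)
  refine ⟨hmf.1, hmf.2.1, ?_⟩
  intro x
  rw [show pvMerged data = ((PySem.List.sorted (pvIvs data) (fun iv => iv.1)).foldl mergeStep
      ([], none)).1 ++ ((PySem.List.sorted (pvIvs data) (fun iv => iv.1)).foldl mergeStep
      ([], none)).2.toList from rfl]
  rw [hmf.2.2 x]
  simp only [List.nil_append, Option.toList_none, inU_nil, false_or]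
  rw [cov_iff_inU]
  unfold inU
  constructor
  · rintro ⟨q, hq, hb⟩
    exact ⟨q, (PySem.List.mem_sorted _ _ _ _).1 hq, hb⟩
  · rintro ⟨q, hq, hb⟩
    exact ⟨q, (PySem.List.mem_sorted _ _ _ _).2 hq, hb⟩

theorem covM_iff (data : List ((Int × Int) × (Int × Int))) (x : Int) :
    ((pvMerged data).any (fun iv => decide (iv.1 ≤ x) && decide (x ≤ iv.2)) = true) ↔
      pvCov data x = true := by
  rw [← (merged_spec data).2.2 x]
  unfold inU
  rw [List.any_eq_true]
  simp only [Bool.and_eq_true, decide_eq_true_eq]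

def pvStBody (st : List (Int × Int) × PySem.Set Int) (p : (Int × Int) × (Int × Int)) :
    List (Int × Int) × PySem.Set Int :=
  (if ((2000000 - p.1.2).natAbs : Int) ≤ ((p.2.1 - p.1.1).natAbs : Int) + ((p.2.2 - p.1.2).natAbs : Int)
   then st.1 ++ [(p.1.1 - (((p.2.1 - p.1.1).natAbs : Int) + ((p.2.2 - p.1.2).natAbs : Int) - ((2000000 - p.1.2).natAbs : Int)),
                  p.1.1 + (((p.2.1 - p.1.1).natAbs : Int) + ((p.2.2 - p.1.2).natAbs : Int) - ((2000000 - p.1.2).natAbs : Int)))]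
   else st.1,
   if p.2.2 == 2000000 then PySem.Set.add st.2 p.2.1 else st.2)

theorem pvIvs_cons (p : (Int × Int) × (Int × Int)) (t : List ((Int × Int) × (Int × Int))) :
    pvIvs (p :: t) =
      (if ((2000000 - p.1.2).natAbs : Int) ≤ pvDist p
       then [(p.1.1 - pvRad p, p.1.1 + pvRad p)] else []) ++ pvIvs t := by
  unfold pvIvs
  rw [List.filter_cons]
  simp only [decide_eq_true_eq]
  by_cases hc : ((2000000 - p.1.2).natAbs : Int) ≤ pvDist p <;>
    simp only [hc, ite_true, ite_false, List.map_cons,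
      List.singleton_append, List.nil_append]

theorem st_fold : ∀ (data : List ((Int × Int) × (Int × Int))) (acc1 : List (Int × Int))
    (acc2 : PySem.Set Int),
    data.foldl pvStBody (acc1, acc2) =
      (acc1 ++ pvIvs data,
       ((data.filter (fun p => p.2.2 == 2000000)).map (fun p => p.2.1)).foldl PySem.Set.add acc2) := by
  intro data
  induction data with
  | nil => intro acc1 acc2; simp [pvIvs]
  | cons p t ih =>
    intro acc1 acc2
    rw [List.foldl_cons]
    rw [show pvStBody (acc1, acc2) p =
        (if ((2000000 - p.1.2).natAbs : Int) ≤ pvDist p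
         then acc1 ++ [(p.1.1 - pvRad p, p.1.1 + pvRad p)] else acc1,
         if p.2.2 == 2000000 then PySem.Set.add acc2 p.2.1 else acc2) from rfl]
    rw [pvIvs_cons, List.filter_cons]
    by_cases hc : ((2000000 - p.1.2).natAbs : Int) ≤ pvDist p <;>
      cases hb : (p.2.2 == 2000000) <;>
        simp only [hc, hb, ite_true, ite_false, Bool.false_eq_true,
          List.map_cons, List.foldl_cons, List.nil_append, List.singleton_append, ih,
          List.append_assoc]

theorem part1_eq (data : List ((Int × Int) × (Int × Int))) :
    part1 data = (((PySem.List.pyRange (pvMinX data) (pvMaxXP data)).countP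
      (fun x => pvCov data x && !pvBeac data x) : Nat) : Int) := by
  simp only [part1]
  have e1 : (data.map (fun p => p.1)).map
      (fun s : Int × Int => s.1 - (PySem.List.max? (data.map (fun p => manhattan p.1 p.2)) (fun d => d)).getD 0) =
      data.map (fun p => p.1.1 - pvMaxDP data) := by
    rw [List.map_map]
    rfl
  have e2 : (data.map (fun p => p.1)).map
      (fun s : Int × Int => s.1 + (PySem.List.max? (data.map (fun p => manhattan p.1 p.2)) (fun d => d)).getD 0) =
      data.map (fun p => p.1.1 + pvMaxDP data) := by
    rw [List.map_map]
    rfl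
  rw [e1, e2]
  rw [show ((PySem.List.min? (data.map (fun p => p.1.1 - pvMaxDP data)) (fun v => v)).getD 0) = pvMinX data from rfl,
      show ((PySem.List.max? (data.map (fun p => p.1.1 + pvMaxDP data)) (fun v => v)).getD 0) = pvMaxXP data from rfl]
  rw [PySem.List.foldl_if_add_one, zero_add]
  have hpt : ∀ x ∈ PySem.List.pyRange (pvMinX data) (pvMaxXP data),
      (((data.map (fun p => p.1)).zip (data.map (fun p => manhattan p.1 p.2))).any
        (fun sd => decide (manhattan (x, 2000000) sd.1 ≤ sd.2) &&
          !(PySem.Set.contains (PySem.Set.ofList (data.map (fun p => p.2))) (x, 2000000))) = true) ↔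
      ((pvCov data x && !pvBeac data x) = true) := by
    intro x _
    rw [List.zip_map', List.any_map]
    have hcomp : ((fun sd : (Int × Int) × Int => decide (manhattan (x, 2000000) sd.1 ≤ sd.2) &&
          !(PySem.Set.contains (PySem.Set.ofList (data.map (fun p => p.2))) (x, 2000000))) ∘
        (fun p : (Int × Int) × (Int × Int) => (p.1, manhattan p.1 p.2))) =
        (fun p : (Int × Int) × (Int × Int) => decide (manhattan (x, 2000000) p.1 ≤ manhattan p.1 p.2) &&
          !(PySem.Set.contains (PySem.Set.ofList (data.map (fun p => p.2))) (x, 2000000))) := rfl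
    rw [hcomp, any_and_const]
    have hc : PySem.Set.contains (PySem.Set.ofList (data.map (fun p => p.2))) (x, 2000000) =
        pvBeac data x := by
      rw [PySem.Set.contains_eq_decide]
      unfold pvBeac
      exact decide_eq_decide.2 (PySem.Set.mem_ofList _ _)
    rw [hc]
    rfl
  rw [List.countP_congr hpt]

theorem part1_alt_eq (data : List ((Int × Int) × (Int × Int))) :
    part1_alt data = ((pvMerged data).map (fun q => q.2 - q.1 + 1)).sum -
      (((pvBxs data).countP (fun bx => (pvMerged data).any
        (fun iv => decide (iv.1 ≤ bx) && decide (bx ≤ iv.2))) : Nat) : Int) := by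
  simp only [part1_alt]
  have h1 : (data.foldl pvStBody ([], PySem.Set.empty)).1 = pvIvs data := by
    rw [st_fold data [] PySem.Set.empty, List.nil_append]
  have h2 : (data.foldl pvStBody ([], PySem.Set.empty)).2 = pvBxs data := by
    rw [st_fold data [] PySem.Set.empty]
    unfold pvBxs
    rw [PySem.Set.ofList_eq_foldl]
    rfl
  rw [show (fun (st : List (Int × Int) × PySem.Set Int) (p : (Int × Int) × (Int × Int)) =>
      (if ((2000000 - p.1.2).natAbs : Int) ≤ ((p.2.1 - p.1.1).natAbs : Int) + ((p.2.2 - p.1.2).natAbs : Int)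
       then st.1 ++ [(p.1.1 - (((p.2.1 - p.1.1).natAbs : Int) + ((p.2.2 - p.1.2).natAbs : Int) - ((2000000 - p.1.2).natAbs : Int)),
                      p.1.1 + (((p.2.1 - p.1.1).natAbs : Int) + ((p.2.2 - p.1.2).natAbs : Int) - ((2000000 - p.1.2).natAbs : Int)))]
       else st.1,
       if p.2.2 == 2000000 then PySem.Set.add st.2 p.2.1 else st.2)) = pvStBody from rfl]
  rw [h1, h2]
  have hms : (fun (mc : List (Int × Int) × Option (Int × Int)) (iv : Int × Int) =>
      match mc.2 with
      | none => (mc.1, some iv)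
      | some c =>
        if iv.1 ≤ c.2 + 1 then
          (if c.2 < iv.2 then (mc.1, some (c.1, iv.2)) else (mc.1, some c))
        else (mc.1 ++ [c], some iv)) = mergeStep := rfl
  rw [hms]
  rw [PySem.List.foldl_add, zero_add]
  rw [foldl_if_sub_one]
  rfl

theorem D_iff (data : List ((Int × Int) × (Int × Int))) (h : data ≠ []) :
    D_part1 data ↔ (pvCov data (pvMaxXP data) && !pvBeac data (pvMaxXP data)) = true := by
  unfold D_part1 pvCov pvBeac pvDist
  rw [maxX_bridge data h]
  simp only [List.any_eq_true, Bool.and_eq_true, Bool.not_eq_true', decide_eq_false_iff_not,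
    decide_eq_true_eq, List.mem_map, Int.abs_eq_natAbs]
  constructor
  · rintro ⟨-, h2, h3⟩
    refine ⟨h2, ?_⟩
    rintro ⟨p, hp, hpe⟩
    exact h3 p hp hpe
  · rintro ⟨h2, h3⟩
    exact ⟨h, h2, fun p hp hpe => h3 ⟨p, hp, hpe⟩⟩

theorem master (data : List ((Int × Int) × (Int × Int))) (h : data ≠ []) :
    part1_alt data = part1 data +
      (if (pvCov data (pvMaxXP data) && !pvBeac data (pvMaxXP data)) = true then 1 else 0) := by
  obtain ⟨hok, hgap, hiff⟩ := merged_spec data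
  have hbd : ∀ q ∈ pvMerged data, pvMinX data ≤ q.1 ∧ q.2 < pvMaxXP data + 1 := by
    intro q hq
    have h1 : inU (pvMerged data) q.1 := ⟨q, hq, le_refl _, hok q hq⟩
    have h2 : inU (pvMerged data) q.2 := ⟨q, hq, hok q hq, le_refl _⟩
    have b1 := cov_bounds data h q.1 ((hiff q.1).1 h1)
    have b2 := cov_bounds data h q.2 ((hiff q.2).1 h2)
    omega
  have hab := minx_le_maxx data h
  have hcount := count_gapped (pvMerged data) (pvMinX data) (pvMaxXP data + 1)
    hgap hok hbd (by omega)
  have hbxs_nd : (pvBxs data).Nodup := by unfold pvBxs; exact PySem.Set.nodup_ofList _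
  have hmem := countP_mem (pvMinX data) (pvMaxXP data + 1) (pvBxs data) hbxs_nd
    (fun bx => pvCov data bx)
    (fun s _ hf => by have := cov_bounds data h s hf; omega)
  have hcongr1 : (pvBxs data).countP (fun bx => (pvMerged data).any
      (fun iv => decide (iv.1 ≤ bx) && decide (bx ≤ iv.2))) =
      (pvBxs data).countP (fun bx => pvCov data bx) :=
    List.countP_congr (fun bx _ => by rw [covM_iff])
  have hcongr2 : (PySem.List.pyRange (pvMinX data) (pvMaxXP data + 1)).countP
      (fun x => (pvMerged data).any (fun iv => decide (iv.1 ≤ x) && decide (x ≤ iv.2))) =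
      (PySem.List.pyRange (pvMinX data) (pvMaxXP data + 1)).countP (fun x => pvCov data x) :=
    List.countP_congr (fun x _ => by rw [covM_iff])
  have hcongr3 : (PySem.List.pyRange (pvMinX data) (pvMaxXP data + 1)).countP
      (fun x => pvCov data x && decide (x ∈ pvBxs data)) =
      (PySem.List.pyRange (pvMinX data) (pvMaxXP data + 1)).countP
      (fun x => pvCov data x && pvBeac data x) :=
    List.countP_congr (fun x _ => by
      by_cases hm : x ∈ pvBxs data
      · have hb := (bxs_iff data x).1 hm
        simp [hm, hb]
      · have hb : pvBeac data x = false := by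
          rw [← Bool.not_eq_true]
          exact fun hbt => hm ((bxs_iff data x).2 hbt)
        simp [hm, hb])
  have hsplit := countP_and_split (PySem.List.pyRange (pvMinX data) (pvMaxXP data + 1))
    (fun x => pvCov data x) (fun x => pvBeac data x)
  have happ : PySem.List.pyRange (pvMinX data) (pvMaxXP data + 1) =
      PySem.List.pyRange (pvMinX data) (pvMaxXP data) ++ [pvMaxXP data] :=
    PySem.List.pyRange_one_succ_right hab
  have hone : List.countP (fun x => pvCov data x && !pvBeac data x) [pvMaxXP data] =
      if (pvCov data (pvMaxXP data) && !pvBeac data (pvMaxXP data)) = true then 1 else 0 := by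
    simp [List.countP_cons]
  rw [part1_alt_eq, part1_eq, ← hcount, hcongr2, hcongr1, ← hmem, hcongr3]
  simp only [happ, List.countP_append] at hsplit ⊢
  have hsplit1 := countP_and_split [pvMaxXP data] (fun x => pvCov data x) (fun x => pvBeac data x)
  by_cases hp : (pvCov data (pvMaxXP data) && !pvBeac data (pvMaxXP data)) = true
  · rw [if_pos hp] at hone
    rw [if_pos hp]
    push_cast
    omega
  · rw [if_neg hp] at hone
    rw [if_neg hp]
    push_cast
    omega

theorem part1_spec : Claim_unchanged_part1 := by
  intro data _ hpre
  unfold Spec_part1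
  intro hnd
  have hm := master data hpre
  rw [D_iff data hpre] at hnd
  rw [hm, if_neg hnd, add_zero]
theorem part1_changed : Claim_changed_part1 := by unfold Claim_changed_part1; decide
theorem part1_tight : Claim_exact_part1 := by
  intro data _ hpre hd
  have hm := master data hpre
  rw [hm, if_pos ((D_iff data hpre).1 hd)]
  omega
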